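-- pv_equiv track=rewrite | github.com/Dennis-Comz/LAB-IPC2-2S-2021 | IPC2_Proyecto3_202010406/Servidor/analizador.py | get_codigo
-- ===== SOURCE A (Python) =====
-- def get_codigo(fecha, no_aprobacion):
--     anio = ''
--     dia = ''
--     mes = ''
--     contador = 0
--     for num in fecha:
--         if num != '/' and contador >= 0 and contador <= 1:
--             dia += num
--             contador += 1
--         elif num != '/' and contador >= 2 and contador <= 3:
--             mes += num
--             contador += 1
--         elif num != '/' and contador > 3:
--             anio += num
--             contador += 1
--
--     ceros = '000000' + str(no_aprobacion)
--     final = anio + mes + dia + ceros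
--     return final
-- ===== SOURCE B (Python) =====
-- def get_codigo(fecha, no_aprobacion):
--     digits = fecha.replace('/', '')
--     return digits[4:] + digits[2:4] + digits[:2] + '000000' + str(no_aprobacion)
-- ===== Notes on version B (the rewrite author's own statement) =====
-- stated objective: simpler
-- what changed: Replaces the per-character loop with its contador state machine and three string accumulators by one replace('/','') cleaning call plus positional slicing (digits[4:], digits[2:4], digits[:2]).
import Mathlib
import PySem

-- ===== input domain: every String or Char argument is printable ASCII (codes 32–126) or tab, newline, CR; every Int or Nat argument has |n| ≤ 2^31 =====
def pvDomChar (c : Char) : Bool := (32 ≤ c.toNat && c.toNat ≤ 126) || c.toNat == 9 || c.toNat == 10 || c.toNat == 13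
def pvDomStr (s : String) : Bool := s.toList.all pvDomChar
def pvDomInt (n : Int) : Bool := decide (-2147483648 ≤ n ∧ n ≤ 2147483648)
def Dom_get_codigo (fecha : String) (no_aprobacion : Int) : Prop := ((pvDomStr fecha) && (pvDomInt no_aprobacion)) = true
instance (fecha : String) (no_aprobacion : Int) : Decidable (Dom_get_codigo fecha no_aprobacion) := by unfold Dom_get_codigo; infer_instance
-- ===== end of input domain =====

-- B replaces A's per-character loop with its contador state machine by one '/'-removal pass plus positional slicing (objective: simpler).

-- ===== PORT A =====
-- loop body of A: state = (anio, dia, mes, contador)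
def pvStepA (st : String × String × String × Int) (num : Char) : String × String × String × Int :=
  if num ≠ '/' ∧ 0 ≤ st.2.2.2 ∧ st.2.2.2 ≤ 1 then (st.1, st.2.1.push num, st.2.2.1, st.2.2.2 + 1)
  else if num ≠ '/' ∧ 2 ≤ st.2.2.2 ∧ st.2.2.2 ≤ 3 then (st.1, st.2.1, st.2.2.1.push num, st.2.2.2 + 1)
  else if num ≠ '/' ∧ st.2.2.2 > 3 then (st.1.push num, st.2.1, st.2.2.1, st.2.2.2 + 1)
  else st

def get_codigo (fecha : String) (no_aprobacion : Int) : String :=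
  let st := fecha.toList.foldl pvStepA ("", "", "", (0 : Int))
  let ceros := "000000" ++ PySem.Int.toStr no_aprobacion
  let final := st.1 ++ st.2.2.1 ++ st.2.1 ++ ceros
  final

-- ===== PORT B =====
def get_codigo_alt (fecha : String) (no_aprobacion : Int) : String :=
  let digits := PySem.Str.replace fecha "/" ""
  PySem.Str.slice digits (some 4) none ++ PySem.Str.slice digits (some 2) (some 4) ++
    PySem.Str.slice digits none (some 2) ++ "000000" ++ PySem.Int.toStr no_aprobacion

-- ===== PRECONDITION & SPEC =====
def Spec_get_codigo (fecha : String) (no_aprobacion : Int) (out : String) : Prop := out = get_codigo_alt fecha no_aprobacion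
instance (fecha : String) (no_aprobacion : Int) (out : String) : Decidable (Spec_get_codigo fecha no_aprobacion out) := by unfold Spec_get_codigo; infer_instance

-- ===== CLAIM (what is proved, stated in full; the proofs are below) =====
def Claim_equal_get_codigo : Prop := ∀ (fecha : String) (no_aprobacion : Int), Dom_get_codigo fecha no_aprobacion → Spec_get_codigo fecha no_aprobacion (get_codigo fecha no_aprobacion)

-- ===== LEMMAS AND PROOFS =====

-- replace with old = "/" and new = "" is exactly a filter
theorem pvReplaceGo_filter (fuel : Nat) : ∀ (l acc : List Char), l.length ≤ fuel →
    PySem.Chars.replace.go ['/'] [] fuel l acc = acc.reverse ++ l.filter (· ≠ '/') := by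
  induction fuel with
  | zero =>
    intro l acc h
    have hl : l = [] := List.eq_nil_of_length_eq_zero (Nat.le_zero.mp h)
    subst hl; simp [PySem.Chars.replace.go]
  | succ n ih =>
    intro l acc h
    cases l with
    | nil => simp [PySem.Chars.replace.go]
    | cons c t =>
      by_cases hc : c = '/'
      · subst hc
        rw [show PySem.Chars.replace.go ['/'] [] (n+1) ('/' :: t) acc
              = PySem.Chars.replace.go ['/'] [] n t acc by
            simp [PySem.Chars.replace.go, List.isPrefixOf]]
        rw [ih t acc (by simpa using Nat.le_of_succ_le_succ h)]
        simp
      · rw [show PySem.Chars.replace.go ['/'] [] (n+1) (c :: t) acc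
              = PySem.Chars.replace.go ['/'] [] n t (c :: acc) by
            simp only [PySem.Chars.replace.go, List.isPrefixOf]
            rw [if_neg (by simp; exact fun h' => absurd h'.symm hc)]]
        rw [ih t (c :: acc) (by simpa using Nat.le_of_succ_le_succ h)]
        simp [hc]

theorem pvReplace_filter (s : List Char) :
    PySem.Chars.replace s ['/'] [] = s.filter (· ≠ '/') := by
  rw [show PySem.Chars.replace s ['/'] [] = PySem.Chars.replace.go ['/'] [] s.length s [] by
        simp [PySem.Chars.replace]]
  simpa using pvReplaceGo_filter s.length s [] le_rfl

-- invariant of A's loop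
theorem pvFoldA (l : List Char) :
    l.foldl pvStepA ("", "", "", (0 : Int)) =
      (String.ofList ((l.filter (· ≠ '/')).drop 4),
       String.ofList ((l.filter (· ≠ '/')).take 2),
       String.ofList (((l.filter (· ≠ '/')).drop 2).take 2),
       ((l.filter (· ≠ '/')).length : Int)) := by
  induction l using List.reverseRecOn with
  | nil => simp
  | append_singleton t x ih =>
    rw [List.foldl_append, List.foldl_cons, List.foldl_nil, ih]
    by_cases hx : x = '/'
    · subst hx; simp [pvStepA]
    · have hf : (t ++ [x]).filter (· ≠ '/') = t.filter (· ≠ '/') ++ [x] := by simp [hx]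
      set f := t.filter (· ≠ '/') with hfdef
      rw [hf]
      unfold pvStepA
      dsimp only
      split_ifs with h1 h2 h3
      · -- contador ≤ 1 : append to dia
        have hl : f.length ≤ 1 := by exact_mod_cast h1.2.2
        simp only [Prod.mk.injEq]
        refine ⟨?_, ?_, ?_, ?_⟩
        · apply String.toList_inj.mp
          simp [List.drop_eq_nil_of_le (show f.length ≤ 4 by omega),
                List.drop_eq_nil_of_le (show (f ++ [x]).length ≤ 4 by simp; omega)]
        · apply String.toList_inj.mp
          simp [List.take_of_length_le (show f.length ≤ 2 by omega),
                List.take_of_length_le (show (f ++ [x]).length ≤ 2 by simp; omega)]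
        · apply String.toList_inj.mp
          simp [List.drop_eq_nil_of_le (show f.length ≤ 2 by omega),
                List.drop_eq_nil_of_le (show (f ++ [x]).length ≤ 2 by simp; omega)]
        · simp only [List.length_append, List.length_cons, List.length_nil]; push_cast; omega
      · -- 2 ≤ contador ≤ 3 : append to mes
        have hl2 : 2 ≤ f.length := by exact_mod_cast h2.2.1
        have hl3 : f.length ≤ 3 := by exact_mod_cast h2.2.2
        simp only [Prod.mk.injEq]
        refine ⟨?_, ?_, ?_, ?_⟩
        · apply String.toList_inj.mp
          simp [List.drop_eq_nil_of_le (show f.length ≤ 4 by omega),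
                List.drop_eq_nil_of_le (show (f ++ [x]).length ≤ 4 by simp; omega)]
        · apply String.toList_inj.mp
          simp [List.take_append_of_le_length (show 2 ≤ f.length by omega)]
        · apply String.toList_inj.mp
          simp [List.drop_append_of_le_length (show 2 ≤ f.length by omega),
                List.take_of_length_le (show (f.drop 2).length ≤ 2 by simp; omega),
                List.take_of_length_le (show (f.drop 2 ++ [x]).length ≤ 2 by simp; omega)]
        · simp only [List.length_append, List.length_cons, List.length_nil]; push_cast; omega
      · -- contador > 3 : append to anio
        have hl4 : 4 ≤ f.length := by exact_mod_cast h3.2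
        simp only [Prod.mk.injEq]
        refine ⟨?_, ?_, ?_, ?_⟩
        · apply String.toList_inj.mp
          simp [List.drop_append_of_le_length (show 4 ≤ f.length by omega)]
        · apply String.toList_inj.mp
          simp [List.take_append_of_le_length (show 2 ≤ f.length by omega)]
        · apply String.toList_inj.mp
          simp [List.drop_append_of_le_length (show 2 ≤ f.length by omega),
                List.take_append_of_le_length (show 2 ≤ (f.drop 2).length by simp; omega)]
        · simp only [List.length_append, List.length_cons, List.length_nil]; push_cast; omega
      · exfalso
        rcases Nat.lt_or_ge f.length 2 with h | h
        · exact h1 ⟨hx, by positivity, by exact_mod_cast Nat.lt_succ_iff.mp h⟩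
        · rcases Nat.lt_or_ge f.length 4 with h' | h'
          · exact h2 ⟨hx, by exact_mod_cast h, by exact_mod_cast (show f.length ≤ 3 by omega)⟩
          · exact h3 ⟨hx, by exact_mod_cast (show 3 < f.length by omega)⟩

-- ===== VERDICT (by name: the statement is the Claim_ definition above) =====
theorem get_codigo_spec : Claim_equal_get_codigo := by
  intro fecha no_aprobacion _
  unfold Spec_get_codigo get_codigo get_codigo_alt
  rw [pvFoldA]
  apply String.toList_inj.mp
  simp [PySem.Str.toList_slice, PySem.Str.toList_replace, pvReplace_filter,
        PySem.Chars.slice_eq_listSlice,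
        PySem.List.slice_to, PySem.List.slice_from, PySem.List.slice_toNat]
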